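-- pv_equiv track=rewrite | github.com/dominikkonaszynski/prg-basics | 10-Test2/p10.py | f
-- ===== SOURCE A (Python) =====
-- def f(array):
--
--     min_value = float('inf')
--     row_min = -1
--     col_min = -1
--
--     for i in range(len(array)):
--         for j in range(len(array[i])):
--             if array[i][j] < min_value:
--                 min_value = array[i][j]
--                 row_min = i
--                 col_min = j
--
--     return row_min == col_min
-- ===== SOURCE B (Python) =====
-- def f(array):
--     vals = [v for row in array for v in row]
--     if not vals:
--         return True
--     m = min(vals)
--     for i, row in enumerate(array):
--         if m in row:
--             return i == row.index(m)
-- ===== Notes on version B (the rewrite author's own statement) =====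
-- stated objective: simpler
-- what changed: Replaces the inline single-pass argmin with running min/row/col state by a reduce-then-locate decomposition: flatten, take min(vals), then an early-return scan for the first row containing the minimum and its index in that row.
import Mathlib
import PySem

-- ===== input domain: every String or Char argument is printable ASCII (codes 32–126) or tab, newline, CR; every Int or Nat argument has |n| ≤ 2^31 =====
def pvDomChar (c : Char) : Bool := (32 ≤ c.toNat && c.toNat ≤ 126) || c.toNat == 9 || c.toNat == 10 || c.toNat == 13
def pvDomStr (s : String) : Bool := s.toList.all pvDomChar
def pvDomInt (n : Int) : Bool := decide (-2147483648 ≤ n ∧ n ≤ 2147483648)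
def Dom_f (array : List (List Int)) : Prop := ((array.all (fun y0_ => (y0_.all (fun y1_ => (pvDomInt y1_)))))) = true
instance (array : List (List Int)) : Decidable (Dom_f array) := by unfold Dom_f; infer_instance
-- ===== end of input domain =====

-- B replaces A's inline single-pass argmin by a reduce-then-locate decomposition:
-- flatten, take the minimum, then scan for the first row containing it (return value only).

-- ===== PORT A =====
-- literal transliteration of A's nested index loops; min_value = float('inf') is the
-- 'none' of an Option Int accumulator (every int is < inf)
def f (array : List (List Int)) : Bool :=
  let s := (PySem.List.pyRange 0 (array.length : Int) 1).foldl
    (fun s i =>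
      let row := PySem.List.pyGetD array i []
      (PySem.List.pyRange 0 (row.length : Int) 1).foldl
        (fun s j =>
          let v := PySem.List.pyGetD row j 0
          match s.1 with
          | none => (some v, i, j)
          | some m => if v < m then (some v, i, j) else s)
        s)
    ((none : Option Int), (-1 : Int), (-1 : Int))
  s.2.1 == s.2.2

-- ===== PORT B =====
-- the 'for i, row in enumerate(array): if m in row: return i == row.index(m)' loop;
-- the [] fall-through is unreachable in B's branch (m is a member of the flattened list)
def pvFindB (m : Int) : List (Int × List Int) → Bool
  | [] => true
  | (i, row) :: rest =>
    if row.contains m then i == ((PySem.List.index? row m).getD 0 : Int)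
    else pvFindB m rest

def f_alt (array : List (List Int)) : Bool :=
  let vals := array.flatMap (fun row => row)
  match PySem.List.min? vals (fun v => v) with
  | none => true
  | some m => pvFindB m (PySem.List.enumerate array 0)

-- ===== PRECONDITION & SPEC =====
def Spec_f (array : List (List Int)) (out : Bool) : Prop := out = f_alt array
instance (array : List (List Int)) (out : Bool) : Decidable (Spec_f array out) := by unfold Spec_f; infer_instance

-- ===== CLAIM (what is proved, stated in full; the proofs are below) =====
def Claim_equal_f : Prop := ∀ (array : List (List Int)), Dom_f array → Spec_f array (f array)

-- ===== LEMMAS AND PROOFS =====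

-- A's loop step on a flat (i, j, v) triple
def pvStepA (s : Option Int × Int × Int) (t : Int × Int × Int) : Option Int × Int × Int :=
  match s.1 with
  | none => (some t.2.2, t.1, t.2.1)
  | some m => if t.2.2 < m then (some t.2.2, t.1, t.2.1) else s

-- first minimal triple (earliest element with minimal value), folded from the right
def pvFm : List (Int × Int × Int) → Option (Int × Int × Int)
  | [] => none
  | t :: ts =>
    match pvFm ts with
    | none => some t
    | some u => if u.2.2 < t.2.2 then some u else some t

-- the flattened, coordinate-tagged traversal order of A
def pvTl (l : List (Int × List Int)) : List (Int × Int × Int) :=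
  l.flatMap (fun p => (PySem.List.enumerate p.2 0).map (fun q => (p.1, q.1, q.2)))

lemma pv_foldl_pyRange_enum {α β : Type} (xs : List α) (d : α) (g : β → Int × α → β) (init : β) :
    (PySem.List.pyRange 0 (xs.length : Int) 1).foldl (fun s i => g s (i, PySem.List.pyGetD xs i d)) init
      = (PySem.List.enumerate xs 0).foldl g init := by
  rw [PySem.List.enumerate_eq_map_pyRange xs d, List.foldl_map, PySem.List.len_eq]

lemma pv_foldl_flatMap {α β γ : Type} (l : List α) (h : α → List β) (st : γ → β → γ) (init : γ) :
    l.foldl (fun s p => (h p).foldl st s) init = (l.flatMap h).foldl st init := by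
  induction l generalizing init with
  | nil => rfl
  | cons x t ih => simp [List.flatMap_cons, List.foldl_append, ih]

lemma pvFm_mem {ts : List (Int × Int × Int)} {u : Int × Int × Int} (h : pvFm ts = some u) : u ∈ ts := by
  induction ts with
  | nil => simp [pvFm] at h
  | cons t ts ih =>
    simp only [pvFm] at h
    cases hfm : pvFm ts with
    | none => rw [hfm] at h; simp at h; simp [h]
    | some v =>
      rw [hfm] at h
      simp only at h
      split at h
      · simp at h; subst h; exact List.mem_cons_of_mem _ (ih hfm)
      · simp at h; simp [h]

lemma pvFm_append (xs ys : List (Int × Int × Int)) :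
    pvFm (xs ++ ys) =
      match pvFm xs, pvFm ys with
      | none, b => b
      | some a, none => some a
      | some a, some b => if b.2.2 < a.2.2 then some b else some a := by
  induction xs with
  | nil => cases hy : pvFm ys <;> simp [pvFm, hy]
  | cons x t ih =>
    simp only [List.cons_append, pvFm, ih]
    cases hx : pvFm t <;> cases hy : pvFm ys <;> simp only []
    all_goals first
      | rfl
      | (split_ifs <;> simp only [] <;>
          first
            | rfl
            | (split_ifs <;> first | rfl | (exfalso; omega)))

lemma pv_runA_some (ts : List (Int × Int × Int)) (m r c : Int) :
    ts.foldl pvStepA (some m, r, c) =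
      match pvFm ts with
      | none => (some m, r, c)
      | some u => if u.2.2 < m then (some u.2.2, u.1, u.2.1) else (some m, r, c) := by
  induction ts generalizing m r c with
  | nil => rfl
  | cons t ts ih =>
    simp only [List.foldl_cons, pvStepA, pvFm]
    by_cases hv : t.2.2 < m
    · rw [if_pos hv, ih]
      cases hfm : pvFm ts <;> simp only []
      · simp [hv]
      · split_ifs <;> simp_all <;> omega
    · rw [if_neg hv, ih]
      cases hfm : pvFm ts <;> simp only []
      · simp [hv]
      · split_ifs <;> simp_all <;> omega

lemma pv_runA (ts : List (Int × Int × Int)) :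
    ts.foldl pvStepA (none, -1, -1) =
      match pvFm ts with
      | none => ((none : Option Int), (-1 : Int), (-1 : Int))
      | some u => (some u.2.2, u.1, u.2.1) := by
  cases ts with
  | nil => rfl
  | cons t ts =>
    have h0 : pvStepA (none, -1, -1) t = (some t.2.2, t.1, t.2.1) := rfl
    simp only [List.foldl_cons, h0, pv_runA_some, pvFm]
    cases hfm : pvFm ts <;> simp only []
    split_ifs <;> simp_all

lemma pv_mem_rowT {i : Int} {row : List Int} {s : Int} {u : Int × Int × Int}
    (h : u ∈ (PySem.List.enumerate row s).map (fun q => (i, q.1, q.2))) : u.2.2 ∈ row := by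
  rcases List.mem_map.mp h with ⟨q, hq, rfl⟩
  rcases (PySem.List.mem_enumerate_iff row s q).mp hq with ⟨k, hk, rfl⟩
  simp

lemma pv_Tl_values (l : List (Int × List Int)) :
    (pvTl l).map (fun u => u.2.2) = l.flatMap (fun p => p.2) := by
  simp only [pvTl, List.map_flatMap, List.map_map]
  refine List.flatMap_congr ?_
  intro p _
  simp [Function.comp_def, PySem.List.map_snd_enumerate]

lemma pv_mem_Tl {l : List (Int × List Int)} {u : Int × Int × Int} (h : u ∈ pvTl l) :
    u.2.2 ∈ l.flatMap (fun p => p.2) := by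
  rw [← pv_Tl_values]
  exact List.mem_map_of_mem h

lemma pv_enum_flat (xs : List (List Int)) (s : Int) :
    (PySem.List.enumerate xs s).flatMap (fun p => p.2) = xs.flatten := by
  induction xs generalizing s with
  | nil => rfl
  | cons r t ih => simp [PySem.List.enumerate_cons, ih]

lemma pv_fold_eq (array : List (List Int)) :
    (PySem.List.pyRange 0 (array.length : Int) 1).foldl
      (fun s i =>
        let row := PySem.List.pyGetD array i []
        (PySem.List.pyRange 0 (row.length : Int) 1).foldl
          (fun s j =>
            let v := PySem.List.pyGetD row j 0
            match s.1 with
            | none => (some v, i, j)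
            | some m => if v < m then (some v, i, j) else s)
          s)
      ((none : Option Int), (-1 : Int), (-1 : Int))
    = (pvTl (PySem.List.enumerate array 0)).foldl pvStepA ((none : Option Int), (-1 : Int), (-1 : Int)) := by
  refine Eq.trans
    (pv_foldl_pyRange_enum array []
      (fun s p => (PySem.List.pyRange 0 (p.2.length : Int) 1).foldl
        (fun s' j => pvStepA s' (p.1, j, PySem.List.pyGetD p.2 j 0)) s) _) ?_
  have hg : (fun (s : Option Int × Int × Int) (p : Int × List Int) =>
        (PySem.List.pyRange 0 (p.2.length : Int) 1).foldl
          (fun s' j => pvStepA s' (p.1, j, PySem.List.pyGetD p.2 j 0)) s)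
      = (fun s p => ((PySem.List.enumerate p.2 0).map (fun q => (p.1, q.1, q.2))).foldl pvStepA s) := by
    funext s p
    exact (pv_foldl_pyRange_enum p.2 0 (fun s' q => pvStepA s' (p.1, q.1, q.2)) s).trans
      List.foldl_map.symm
  rw [hg]
  exact pv_foldl_flatMap (PySem.List.enumerate array 0)
    (fun p => (PySem.List.enumerate p.2 0).map (fun q => (p.1, q.1, q.2))) pvStepA _

lemma pv_f_eq (array : List (List Int)) :
    f array =
      match pvFm (pvTl (PySem.List.enumerate array 0)) with
      | none => true
      | some u => u.1 == u.2.1 := by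
  unfold f
  rw [pv_fold_eq array, pv_runA]
  cases pvFm (pvTl (PySem.List.enumerate array 0)) <;> simp

-- in a row whose minimum is the global minimum m, the first minimal triple is
-- (i, s + index of m, m)
lemma pv_row (i m : Int) (row : List Int) (s : Int) (hmem : m ∈ row) (hmin : ∀ v ∈ row, m ≤ v) :
    ∃ k : Nat, PySem.List.index? row m = some k ∧
      pvFm ((PySem.List.enumerate row s).map (fun q => (i, q.1, q.2))) = some (i, s + (k : Int), m) := by
  induction row generalizing s with
  | nil => simp at hmem
  | cons x t ih =>
    by_cases hx : x = m
    · subst hx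
      refine ⟨0, PySem.List.index?_cons_self x t, ?_⟩
      simp only [PySem.List.enumerate_cons, List.map_cons, pvFm]
      cases hfm : pvFm ((PySem.List.enumerate t (s + 1)).map (fun q => (i, q.1, q.2))) with
      | none => simp
      | some u =>
        have hu : u.2.2 ∈ t := pv_mem_rowT (pvFm_mem hfm)
        have : x ≤ u.2.2 := hmin _ (List.mem_cons_of_mem _ hu)
        simp only []
        rw [if_neg (by simpa using not_lt.mpr this)]
        simp
    · have hmt : m ∈ t := by
        rcases List.mem_cons.mp hmem with h | h
        · exact absurd h.symm hx
        · exact h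
      obtain ⟨k, hk, hfm⟩ := ih (s + 1) hmt (fun v hv => hmin v (List.mem_cons_of_mem _ hv))
      refine ⟨k + 1, ?_, ?_⟩
      · rw [PySem.List.index?_cons_of_ne t hx, hk]
        rfl
      · simp only [PySem.List.enumerate_cons, List.map_cons, pvFm, hfm]
        have hlt : m < x := lt_of_le_of_ne (hmin x List.mem_cons_self) (fun h => hx h.symm)
        rw [if_pos (by simpa using hlt)]
        congr 1
        push_cast
        ring_nf

-- the first row of l that contains the overall minimum m holds the first minimal triple
lemma pv_main (l : List (Int × List Int)) (m : Int)
    (hmem : m ∈ l.flatMap (fun p => p.2)) (hmin : ∀ v ∈ l.flatMap (fun p => p.2), m ≤ v) :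
    ∃ u, pvFm (pvTl l) = some u ∧ u.2.2 = m ∧ pvFindB m l = (u.1 == u.2.1) := by
  induction l with
  | nil => simp at hmem
  | cons p rest ih =>
    obtain ⟨i, row⟩ := p
    have hTl : pvTl ((i, row) :: rest)
        = (PySem.List.enumerate row 0).map (fun q => (i, q.1, q.2)) ++ pvTl rest := by
      simp [pvTl]
    have hminrow : ∀ v ∈ row, m ≤ v := fun v hv => hmin v (by simp [hv])
    have hminrest : ∀ v ∈ rest.flatMap (fun p => p.2), m ≤ v := fun v hv => hmin v (by simp; right; simpa using hv)
    by_cases hrow : m ∈ row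
    · obtain ⟨k, hk, hfmrow⟩ := pv_row i m row 0 hrow hminrow
      have hcomb : pvFm (pvTl ((i, row) :: rest)) = some (i, (k : Int), m) := by
        rw [hTl, pvFm_append, hfmrow]
        cases hfr : pvFm (pvTl rest) with
        | none => simp
        | some b =>
          have hb : m ≤ b.2.2 := hminrest _ (pv_mem_Tl (pvFm_mem hfr))
          simp only []
          rw [if_neg (by simpa using not_lt.mpr hb)]
          norm_num
      refine ⟨(i, (k : Int), m), hcomb, rfl, ?_⟩
      simp only [pvFindB]
      rw [if_pos (by simpa using hrow), hk]
      rfl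
    · have hmrest : m ∈ rest.flatMap (fun p => p.2) := by
        simp at hmem
        rcases hmem with h | h
        · exact absurd h hrow
        · simpa using h
      obtain ⟨u, hfu, hum, hfind⟩ := ih hmrest hminrest
      refine ⟨u, ?_, hum, ?_⟩
      · rw [hTl, pvFm_append, hfu]
        cases hfr : pvFm ((PySem.List.enumerate row 0).map (fun q => (i, q.1, q.2))) with
        | none => simp
        | some a =>
          have ha : a.2.2 ∈ row := pv_mem_rowT (pvFm_mem hfr)
          have hlt : m < a.2.2 :=
            lt_of_le_of_ne (hminrow _ ha) (fun h => hrow (h ▸ ha))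
          simp only []
          rw [if_pos (by rw [hum]; exact hlt)]
      · simp only [pvFindB]
        rw [if_neg (by simpa using hrow)]
        exact hfind

-- ===== VERDICT (by name: the statement is the Claim_ definition above) =====
theorem f_spec : Claim_equal_f := by
  intro array _
  show f array = f_alt array
  cases hmin : PySem.List.min? array.flatten (fun v => v) with
  | none =>
    have hBeq : f_alt array = true := by simp [f_alt, hmin]
    have hnil : array.flatten = [] :=
      (PySem.List.min?_eq_none_iff _ _).mp hmin
    have hTl : pvTl (PySem.List.enumerate array 0) = [] := by
      have := pv_Tl_values (PySem.List.enumerate array 0)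
      rw [pv_enum_flat, hnil] at this
      exact List.map_eq_nil_iff.mp this
    rw [pv_f_eq, hTl, hBeq]
    rfl
  | some m =>
    have hBeq : f_alt array = pvFindB m (PySem.List.enumerate array 0) := by
      simp [f_alt, hmin]
    have hmem : m ∈ (PySem.List.enumerate array 0).flatMap (fun p => p.2) := by
      rw [pv_enum_flat]
      exact PySem.List.min?_mem hmin
    have hle : ∀ v ∈ (PySem.List.enumerate array 0).flatMap (fun p => p.2), m ≤ v := by
      rw [pv_enum_flat]
      exact PySem.List.min?_isMin hmin
    obtain ⟨u, hfu, _, hfind⟩ := pv_main (PySem.List.enumerate array 0) m hmem hle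
    rw [pv_f_eq, hfu, hBeq]
    exact hfind.symm
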